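-- pv_equiv track=rewrite | github.com/vintcessun/autozhy_logisim_report | src/vendor/logisim_logic/geometry.py | _splitter_default_distribution
-- ===== SOURCE A (Python) =====
-- def _splitter_default_distribution(fanout: int, bits: int) -> list[int]:
--     if fanout <= 0:
--         return [0] * bits
--     if fanout >= bits:
--         return [index + 1 for index in range(bits)]
--     threads_per_end = bits // fanout
--     ends_with_extra = bits % fanout
--     cur_end = -1
--     left_in_end = 0
--     result: list[int] = []
--     for _ in range(bits):
--         if left_in_end == 0:
--             cur_end += 1
--             left_in_end = threads_per_end
--             if ends_with_extra > 0:
--                 left_in_end += 1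
--                 ends_with_extra -= 1
--         result.append(cur_end + 1)
--         left_in_end -= 1
--     return result
-- ===== SOURCE B (Python) =====
-- def _splitter_default_distribution(fanout: int, bits: int) -> list[int]:
--     if fanout <= 0:
--         return [0] * bits
--     q, r = divmod(bits, fanout)
--     cut = r * (q + 1)
--     return [i // (q + 1) + 1 if i < cut else r + (i - cut) // q + 1
--             for i in range(bits)]
-- ===== Notes on version B (the rewrite author's own statement) =====
-- stated objective: simpler
-- what changed: Replaces the stateful cur_end/left_in_end/ends_with_extra counter loop (and the separate fanout>=bits early-return branch, which the formula subsumes) by a closed-form arithmetic map: each index i computes its end directly from q=bits//fanout, r=bits%fanout via the boundary r*(q+1).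
import Mathlib
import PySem

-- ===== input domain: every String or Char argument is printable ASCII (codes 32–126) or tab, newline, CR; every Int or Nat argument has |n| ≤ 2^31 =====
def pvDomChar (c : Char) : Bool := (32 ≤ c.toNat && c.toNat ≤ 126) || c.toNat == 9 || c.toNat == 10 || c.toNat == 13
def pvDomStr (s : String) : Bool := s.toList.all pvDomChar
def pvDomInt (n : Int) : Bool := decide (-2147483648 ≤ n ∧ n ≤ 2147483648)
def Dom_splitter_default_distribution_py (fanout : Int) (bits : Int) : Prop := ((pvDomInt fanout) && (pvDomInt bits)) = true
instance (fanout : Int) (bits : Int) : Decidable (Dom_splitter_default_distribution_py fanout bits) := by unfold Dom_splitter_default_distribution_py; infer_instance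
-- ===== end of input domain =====

-- B replaces A's stateful cur_end/left_in_end/ends_with_extra counter loop by a closed-form
-- per-index formula (simpler decomposition; same O(bits) cost).


-- ===== PORT A =====
-- the 'for _ in range(bits)' loop, as fuel recursion over the same four-part state
def pvA_loop (tpe : Int) : Nat → Int → Int → Int → List Int → List Int
  | 0, _, _, _, res => res
  | (n+1), cur_end, left_in_end, ends_with_extra, res =>
    if left_in_end = 0 then
      if 0 < ends_with_extra then
        pvA_loop tpe n (cur_end + 1) (tpe + 1 - 1) (ends_with_extra - 1)
          (res ++ [(cur_end + 1) + 1])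
      else
        pvA_loop tpe n (cur_end + 1) (tpe - 1) ends_with_extra
          (res ++ [(cur_end + 1) + 1])
    else
      pvA_loop tpe n cur_end (left_in_end - 1) ends_with_extra (res ++ [cur_end + 1])

def splitter_default_distribution_py (fanout : Int) (bits : Int) : List Int :=
  if fanout ≤ 0 then List.replicate bits.toNat 0
  else if bits ≤ fanout then (PySem.List.pyRange 0 bits 1).map (fun index => index + 1)
  else
    let threads_per_end := PySem.Int.floordiv bits fanout
    let ends_with_extra := PySem.Int.mod bits fanout
    pvA_loop threads_per_end bits.toNat (-1) 0 ends_with_extra []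

-- ===== PORT B =====
-- the body of Source B's comprehension: the end of wire i, in closed form
def pvTarget (q r : Int) (i : Int) : Int :=
  if i < r * (q + 1) then PySem.Int.floordiv i (q + 1) + 1
  else r + PySem.Int.floordiv (i - r * (q + 1)) q + 1

def splitter_default_distribution_py_alt (fanout : Int) (bits : Int) : List Int :=
  if fanout ≤ 0 then List.replicate bits.toNat 0
  else
    let q := PySem.Int.floordiv bits fanout
    let r := PySem.Int.mod bits fanout
    (PySem.List.pyRange 0 bits 1).map (pvTarget q r)

-- ===== PRECONDITION & SPEC =====
def Spec_splitter_default_distribution_py (fanout : Int) (bits : Int) (out : List Int) : Prop := out = splitter_default_distribution_py_alt fanout bits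
instance (fanout : Int) (bits : Int) (out : List Int) : Decidable (Spec_splitter_default_distribution_py fanout bits out) := by unfold Spec_splitter_default_distribution_py; infer_instance

-- ===== CLAIM (what is proved, stated in full; the proofs are below) =====
def Claim_equal_splitter_default_distribution_py : Prop := ∀ (fanout : Int) (bits : Int), Dom_splitter_default_distribution_py fanout bits → Spec_splitter_default_distribution_py fanout bits (splitter_default_distribution_py fanout bits)

-- ===== LEMMAS AND PROOFS =====

-- start index of end e (0-based): ends 0..r-1 have q+1 wires, the rest q
def pvBnd (q r e : Int) : Int := if e ≤ r then e * (q + 1) else r * (q + 1) + (e - r) * q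

lemma pvBnd_le (q r e : Int) (h : e ≤ r) : pvBnd q r e = e * (q + 1) := by
  simp [pvBnd, h]

lemma pvBnd_ge (q r e : Int) (h : r ≤ e) : pvBnd q r e = r * (q + 1) + (e - r) * q := by
  unfold pvBnd
  split_ifs with h'
  · have : e = r := le_antisymm h' h
    subst this; ring
  · rfl

lemma pvTarget_of_bnd (q r c i : Int) (hq : 1 ≤ q)
    (h1 : pvBnd q r c ≤ i) (h2 : i < pvBnd q r (c + 1)) : pvTarget q r i = c + 1 := by
  by_cases hcr : c + 1 ≤ r
  · rw [pvBnd_le q r c (by omega)] at h1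
    rw [pvBnd_le q r (c+1) hcr] at h2
    have hlt : i < r * (q + 1) := by
      have := mul_le_mul_of_nonneg_right hcr (by omega : (0:Int) ≤ q + 1)
      omega
    have hd : PySem.Int.floordiv i (q + 1) = c :=
      (PySem.Int.floordiv_eq_iff_of_pos (by omega : (0:Int) < q + 1)).mpr ⟨h1, h2⟩
    unfold pvTarget
    rw [if_pos hlt, hd]
  · have hrc : r ≤ c := by omega
    rw [pvBnd_ge q r c hrc] at h1
    rw [pvBnd_ge q r (c+1) (by omega)] at h2
    have hge : ¬ i < r * (q + 1) := by
      have : 0 ≤ (c - r) * q := mul_nonneg (by omega) (by omega)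
      omega
    unfold pvTarget
    rw [if_neg hge]
    have hdiv : PySem.Int.floordiv (i - r * (q + 1)) q = c - r := by
      rw [(PySem.Int.floordiv_eq_iff_of_pos (by omega : (0:Int) < q))]
      constructor
      · omega
      · have : (c - r + 1) * q = (c + 1 - r) * q := by ring
        omega
    rw [hdiv]; ring

lemma pvA_loop_eq (q r : Int) (hq : 1 ≤ q) :
    ∀ (n : Nat) (k c left x : Int) (res : List Int),
      x = max (r - (c + 1)) 0 →
      ((left = 0 ∧ k = pvBnd q r (c + 1) ∧ -1 ≤ c) ∨
       (pvBnd q r c ≤ k ∧ k < pvBnd q r (c + 1) ∧ left = pvBnd q r (c + 1) - k ∧ 0 ≤ c)) →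
      pvA_loop q n c left x res = res ++ (List.range n).map (fun j : Nat => pvTarget q r (k + (j : Int))) := by
  intro n
  induction n with
  | zero => intro k c left x res _ _; simp [pvA_loop]
  | succ n ih =>
    intro k c left x res hx hinv
    have hrange : (List.range (n+1)).map (fun j : Nat => pvTarget q r (k + (j:Int)))
        = pvTarget q r k :: (List.range n).map (fun j : Nat => pvTarget q r ((k+1) + (j:Int))) := by
      rw [List.range_succ_eq_map, List.map_cons, List.map_map]
      congr 1
      · norm_num
      · apply List.map_congr_left
        intro j _
        simp only [Function.comp]
        congr 1
        push_cast
        ring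
    rw [hrange]
    by_cases hl : left = 0
    · -- a new end opens
      have hk : k = pvBnd q r (c + 1) ∧ -1 ≤ c := by
        rcases hinv with ⟨_, h2, h3⟩ | ⟨_, h2, h3, _⟩
        · exact ⟨h2, h3⟩
        · omega
      obtain ⟨hk, hcm1⟩ := hk
      by_cases hxp : 0 < x
      · -- extra wire: end c+1 has q+1 wires, c+1 < r
        have hclt : c + 1 < r := by omega
        have hb1 : pvBnd q r (c + 1) = (c + 1) * (q + 1) := pvBnd_le q r _ (by omega)
        have hb2 : pvBnd q r (c + 2) = (c + 2) * (q + 1) := pvBnd_le q r _ (by omega)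
        have hb2k : pvBnd q r (c + 2) = k + (q + 1) := by rw [hb2, hk, hb1]; ring
        have hval : pvTarget q r k = (c + 1) + 1 := by
          apply pvTarget_of_bnd q r (c+1) k hq
          · omega
          · have : pvBnd q r (c + 1 + 1) = pvBnd q r (c + 2) := by rw [show c + 1 + 1 = c + 2 from by ring]
            omega
        rw [pvA_loop, if_pos hl, if_pos hxp,
          ih (k+1) (c+1) (q + 1 - 1) (x - 1) (res ++ [(c+1)+1]) (by omega)
            (Or.inr (by
              refine ⟨?_, ?_, ?_, by omega⟩
              · omega
              · have : pvBnd q r (c + 1 + 1) = pvBnd q r (c + 2) := by rw [show c + 1 + 1 = c + 2 from by ring]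
                omega
              · have : pvBnd q r (c + 1 + 1) = pvBnd q r (c + 2) := by rw [show c + 1 + 1 = c + 2 from by ring]
                omega))]
        rw [hval]
        simp
      · -- no extra: end c+1 has q wires, r ≤ c+1
        have hx0 : x = 0 := by omega
        have hrc : r ≤ c + 1 := by omega
        have hb1 : pvBnd q r (c + 1) = r * (q + 1) + (c + 1 - r) * q := pvBnd_ge q r _ hrc
        have hb2 : pvBnd q r (c + 2) = r * (q + 1) + (c + 2 - r) * q := pvBnd_ge q r _ (by omega)
        have hb2k : pvBnd q r (c + 2) = k + q := by rw [hb2, hk, hb1]; ring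
        have hval : pvTarget q r k = (c + 1) + 1 := by
          apply pvTarget_of_bnd q r (c+1) k hq
          · omega
          · have : pvBnd q r (c + 1 + 1) = pvBnd q r (c + 2) := by rw [show c + 1 + 1 = c + 2 from by ring]
            omega
        rw [pvA_loop, if_pos hl, if_neg hxp,
          ih (k+1) (c+1) (q - 1) x (res ++ [(c+1)+1]) (by omega)
            (by
              have h11 : pvBnd q r (c + 1 + 1) = pvBnd q r (c + 2) := by rw [show c + 1 + 1 = c + 2 from by ring]
              by_cases hq1 : q = 1
              · exact Or.inl ⟨by omega, by omega, by omega⟩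
              · exact Or.inr ⟨by omega, by omega, by omega, by omega⟩)]
        rw [hval]
        simp
    · -- continue in the current end
      have hinv2 : pvBnd q r c ≤ k ∧ k < pvBnd q r (c + 1) ∧ left = pvBnd q r (c + 1) - k ∧ 0 ≤ c := by
        rcases hinv with ⟨h1, _, _⟩ | h
        · exact absurd h1 hl
        · exact h
      obtain ⟨h1, h2, h3, h4⟩ := hinv2
      have hval : pvTarget q r k = c + 1 := pvTarget_of_bnd q r c k hq h1 h2
      rw [pvA_loop, if_neg hl,
        ih (k+1) c (left - 1) x (res ++ [c+1]) hx
          (by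
            by_cases hl1 : left - 1 = 0
            · exact Or.inl ⟨by omega, by omega, by omega⟩
            · exact Or.inr ⟨by omega, by omega, by omega, h4⟩)]
      rw [hval]
      simp

lemma pvTarget_small (fanout bits i : Int) (hf : 0 < fanout) (hb : 0 < bits)
    (hbf : bits ≤ fanout) (hi0 : 0 ≤ i) (hib : i < bits) :
    pvTarget (PySem.Int.floordiv bits fanout) (PySem.Int.mod bits fanout) i = i + 1 := by
  by_cases heq : bits = fanout
  · have hq : PySem.Int.floordiv bits fanout = 1 := by
      rw [(PySem.Int.floordiv_eq_iff_of_pos hf)]; omega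
    have hrr : PySem.Int.mod bits fanout = 0 := by
      rw [PySem.Int.mod_eq_emod_of_pos hf, heq, Int.emod_self]
    rw [hq, hrr]
    unfold pvTarget
    rw [if_neg (by omega)]
    have : PySem.Int.floordiv (i - 0 * (1 + 1)) 1 = i := by
      rw [(PySem.Int.floordiv_eq_iff_of_pos (by omega : (0:Int) < 1))]; omega
    rw [this]; ring
  · have hlt : bits < fanout := by omega
    have hq : PySem.Int.floordiv bits fanout = 0 := by
      rw [(PySem.Int.floordiv_eq_iff_of_pos hf)]; omega
    have hrr : PySem.Int.mod bits fanout = bits := by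
      rw [PySem.Int.mod_eq_emod_of_pos hf, Int.emod_eq_of_lt (by omega) hlt]
    rw [hq, hrr]
    unfold pvTarget
    rw [if_pos (by omega)]
    have : PySem.Int.floordiv i (0 + 1) = i := by
      rw [(PySem.Int.floordiv_eq_iff_of_pos (by omega : (0:Int) < 0 + 1))]; omega
    rw [this]

-- ===== VERDICT (by name: the statement is the Claim_ definition above) =====
theorem splitter_default_distribution_py_spec : Claim_equal_splitter_default_distribution_py := by
  intro fanout bits _
  unfold Spec_splitter_default_distribution_py
  unfold splitter_default_distribution_py splitter_default_distribution_py_alt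
  by_cases hf : fanout ≤ 0
  · simp [hf]
  · rw [if_neg hf, if_neg hf]
    have hf : (0:Int) < fanout := by omega
    by_cases hbf : bits ≤ fanout
    · rw [if_pos hbf]
      apply List.map_congr_left
      intro i hi
      rw [PySem.List.mem_pyRange_one] at hi
      exact (pvTarget_small fanout bits i hf (by omega) hbf hi.1 hi.2).symm
    · rw [if_neg hbf]
      have hbf : fanout < bits := by omega
      set q := PySem.Int.floordiv bits fanout with hqdef
      set r := PySem.Int.mod bits fanout with hrdef
      have hq : 1 ≤ q := by
        rw [hqdef, (PySem.Int.le_floordiv_iff_mul_le hf)]; omega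
      have hr : 0 ≤ r := PySem.Int.mod_nonneg bits hf
      rw [pvA_loop_eq q r hq bits.toNat 0 (-1) 0 r [] (by omega)
        (Or.inl ⟨rfl, by rw [show (-1:Int) + 1 = 0 from by ring, pvBnd_le q r 0 hr]; ring, by omega⟩)]
      rw [PySem.List.pyRange_one, List.map_map]
      simp only [List.nil_append, sub_zero]
      apply List.map_congr_left
      intro j _
      simp [Function.comp]
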